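-- pv_equiv track=rewrite | github.com/ivekhov/otus_python | 01_advanced_basic/poker_v3.py | kind
-- ===== SOURCE A (Python) =====
-- from collections import Counter
--
-- def kind(n, ranks):
--     """Возвращает первый ранг, который n раз встречается
--     в данной руке.
--     Возвращает None, если ничего не найдено
--     """
--     temp = Counter(ranks)
--     output = []
--     for k, v in temp.items():
--         if v == n:
--             output.append(k)
--     try:
--         return max(output)
--     except ValueError:
--         return None
-- ===== SOURCE B (Python) =====
-- def kind(n, ranks):
--     """Return the max rank occurring exactly n times, else None —
--     sort-then-run-scan instead of a Counter histogram."""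
--     s = sorted(ranks)
--     runs = []
--     if s:
--         cur, cnt = s[0], 1
--         for x in s[1:]:
--             if x == cur:
--                 cnt += 1
--             else:
--                 runs.append((cur, cnt))
--                 cur, cnt = x, 1
--         runs.append((cur, cnt))
--     cands = [r for r, c in runs if c == n]
--     return max(cands, default=None)
-- ===== Notes on version B (the rewrite author's own statement) =====
-- stated objective: alternative
-- what changed: Replaces the Counter hash-histogram plus items scan with a sort-then-run-length scan: sort the ranks once, walk adjacent runs keeping (current value, run length), collect values whose run length equals n, and take max with default None.
import Mathlib
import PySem

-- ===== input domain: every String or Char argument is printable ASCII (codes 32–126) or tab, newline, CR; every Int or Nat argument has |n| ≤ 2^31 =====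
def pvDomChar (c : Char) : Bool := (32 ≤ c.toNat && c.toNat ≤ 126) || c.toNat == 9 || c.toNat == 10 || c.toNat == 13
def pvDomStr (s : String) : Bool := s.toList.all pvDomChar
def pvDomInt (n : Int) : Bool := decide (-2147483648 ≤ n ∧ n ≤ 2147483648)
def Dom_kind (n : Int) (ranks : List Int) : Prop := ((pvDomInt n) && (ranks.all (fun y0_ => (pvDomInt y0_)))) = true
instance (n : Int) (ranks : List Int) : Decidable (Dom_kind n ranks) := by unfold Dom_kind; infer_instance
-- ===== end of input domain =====

-- B replaces A's Counter histogram with a sort-then-run-length scan (alternative decomposition, same cost class).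


-- ===== PORT A =====
-- temp = Counter(ranks); for k, v in temp.items(): if v == n: output.append(k); max(output) or None
def kind (n : Int) (ranks : List Int) : Option Int :=
  let temp := PySem.Dict.counter ranks
  let output := temp.items.foldl (fun acc kv => if kv.2 == n then acc ++ [kv.1] else acc) ([] : List Int)
  PySem.List.max? output (fun x => x)

-- ===== PORT B =====
-- the 'for x in s[1:]' run-length loop of Source B, carrying (cur, cnt); the trailing append is the base case
def kindRunsAux : List Int → Int → Int → List (Int × Int)
  | [], cur, cnt => [(cur, cnt)]
  | x :: xs, cur, cnt =>
      if x = cur then kindRunsAux xs cur (cnt + 1) else (cur, cnt) :: kindRunsAux xs x 1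

def kindRuns : List Int → List (Int × Int)
  | [] => []
  | x :: xs => kindRunsAux xs x 1

def kind_alt (n : Int) (ranks : List Int) : Option Int :=
  let s := PySem.List.sorted ranks (fun x => x) false
  let cands := ((kindRuns s).filter (fun p => p.2 == n)).map (fun p => p.1)
  PySem.List.max? cands (fun x => x)

-- ===== PRECONDITION & SPEC =====
def Spec_kind (n : Int) (ranks : List Int) (out : Option Int) : Prop := out = kind_alt n ranks
instance (n : Int) (ranks : List Int) (out : Option Int) : Decidable (Spec_kind n ranks out) := by unfold Spec_kind; infer_instance

-- ===== CLAIM (what is proved, stated in full; the proofs are below) =====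
def Claim_equal_kind : Prop := ∀ (n : Int) (ranks : List Int), Dom_kind n ranks → Spec_kind n ranks (kind n ranks)

-- ===== LEMMAS AND PROOFS =====

-- run-scan spec: on a tail whose elements all dominate cur and which is sorted,
-- the pairs produced are exactly (value, total multiplicity), cur carrying cnt already-seen copies
lemma mem_kindRunsAux (xs : List Int) (cur cnt x c : Int)
    (hle : ∀ z ∈ xs, cur ≤ z) (hs : xs.Pairwise (· ≤ ·)) :
    (x, c) ∈ kindRunsAux xs cur cnt ↔
      (x = cur ∧ c = cnt + (xs.count cur : Int)) ∨
      (x ∈ xs ∧ x ≠ cur ∧ c = (xs.count x : Int)) := by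
  induction xs generalizing cur cnt with
  | nil => simp [kindRunsAux]
  | cons y ys ih =>
    rw [List.pairwise_cons] at hs
    by_cases hy : y = cur
    · subst hy
      rw [kindRunsAux, if_pos rfl,
          ih y (cnt + 1) (fun z hz => hs.1 z hz) hs.2]
      constructor
      · rintro (⟨rfl, rfl⟩ | ⟨hm, hne, rfl⟩)
        · exact Or.inl ⟨rfl, by simp; omega⟩
        · exact Or.inr ⟨List.mem_cons_of_mem _ hm, hne,
            by simp [Ne.symm hne]⟩
      · rintro (⟨rfl, rfl⟩ | ⟨hm, hne, rfl⟩)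
        · exact Or.inl ⟨rfl, by simp; omega⟩
        · rcases List.mem_cons.mp hm with rfl | hm
          · exact absurd rfl hne
          · exact Or.inr ⟨hm, hne, by simp [Ne.symm hne]⟩
    · have hcy : cur < y := lt_of_le_of_ne (hle y List.mem_cons_self) (Ne.symm hy)
      have hys_le : ∀ z ∈ ys, y ≤ z := hs.1
      rw [kindRunsAux, if_neg hy, List.mem_cons, ih y 1 hys_le hs.2]
      have hcur0 : (y :: ys).count cur = 0 := by
        refine List.count_eq_zero.mpr ?_
        intro hmem
        rcases List.mem_cons.mp hmem with heq | hmem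
        · exact absurd heq (by omega)
        · exact absurd (hys_le _ hmem) (by omega)
      constructor
      · rintro (heq | ⟨rfl, rfl⟩ | ⟨hm, hne, rfl⟩)
        · rw [Prod.mk.injEq] at heq
          exact Or.inl ⟨heq.1, by rw [heq.2, hcur0]; simp⟩
        · refine Or.inr ⟨List.mem_cons_self, hy, ?_⟩
          simp; omega
        · have hxc : cur < x := lt_of_lt_of_le hcy (hys_le _ hm)
          exact Or.inr ⟨List.mem_cons_of_mem _ hm, by omega,
            by simp [Ne.symm hne]⟩
      · rintro (⟨rfl, rfl⟩ | ⟨hm, hne, rfl⟩)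
        · exact Or.inl (by rw [hcur0]; simp)
        · by_cases hxy : x = y
          · subst hxy
            exact Or.inr (Or.inl ⟨rfl, by simp; omega⟩)
          · rcases List.mem_cons.mp hm with heq | hm'
            · exact absurd heq hxy
            · exact Or.inr (Or.inr ⟨hm', hxy, by simp [Ne.symm hxy]⟩)

lemma mem_kindRuns (s : List Int) (hs : s.Pairwise (· ≤ ·)) (x c : Int) :
    (x, c) ∈ kindRuns s ↔ x ∈ s ∧ c = (s.count x : Int) := by
  cases s with
  | nil => simp [kindRuns]
  | cons y ys =>
    rw [List.pairwise_cons] at hs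
    rw [kindRuns, mem_kindRunsAux ys y 1 x c hs.1 hs.2]
    constructor
    · rintro (⟨rfl, rfl⟩ | ⟨hm, hne, rfl⟩)
      · exact ⟨List.mem_cons_self, by simp; omega⟩
      · exact ⟨List.mem_cons_of_mem _ hm, by simp [Ne.symm hne]⟩
    · rintro ⟨hm, rfl⟩
      by_cases hxy : x = y
      · subst hxy
        exact Or.inl ⟨rfl, by simp; omega⟩
      · rcases List.mem_cons.mp hm with heq | hm'
        · exact absurd heq hxy
        · exact Or.inr ⟨hm', hxy, by simp [Ne.symm hxy]⟩

lemma max?_id_congr (l1 l2 : List Int) (h : ∀ x, x ∈ l1 ↔ x ∈ l2) :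
    PySem.List.max? l1 (fun x => x) = PySem.List.max? l2 (fun x => x) := by
  cases l1 with
  | nil =>
    cases l2 with
    | nil => rfl
    | cons b t2 => exact absurd ((h b).mpr List.mem_cons_self) (by simp)
  | cons a t1 =>
    cases l2 with
    | nil => exact absurd ((h a).mp List.mem_cons_self) (by simp)
    | cons b t2 =>
      rw [PySem.List.max?_id_cons, PySem.List.max?_id_cons]
      have m1mem : t1.foldl max a ∈ a :: t1 := by
        rcases PySem.List.foldl_max_mem t1 a with h' | h'
        · rw [h']; exact List.mem_cons_self
        · exact List.mem_cons_of_mem _ h'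
      have m2mem : t2.foldl max b ∈ b :: t2 := by
        rcases PySem.List.foldl_max_mem t2 b with h' | h'
        · rw [h']; exact List.mem_cons_self
        · exact List.mem_cons_of_mem _ h'
      have le12 : t1.foldl max a ≤ t2.foldl max b := by
        rcases List.mem_cons.mp ((h _).mp m1mem) with h' | h'
        · exact h' ▸ (PySem.List.le_foldl_max t2 b).1
        · exact (PySem.List.le_foldl_max t2 b).2 _ h'
      have le21 : t2.foldl max b ≤ t1.foldl max a := by
        rcases List.mem_cons.mp ((h _).mpr m2mem) with h' | h'
        · exact h' ▸ (PySem.List.le_foldl_max t1 a).1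
        · exact (PySem.List.le_foldl_max t1 a).2 _ h'
      exact congrArg some (le_antisymm le12 le21)

lemma mem_kind_output (n : Int) (ranks : List Int) (x : Int) :
    x ∈ ((PySem.Dict.counter ranks).items.foldl
          (fun acc kv => if kv.2 == n then acc ++ [kv.1] else acc) ([] : List Int)) ↔
      x ∈ ranks ∧ (ranks.count x : Int) = n := by
  rw [PySem.List.foldl_append_if]
  rw [PySem.Dict.items_counter]
  rw [List.nil_append, List.mem_map]
  constructor
  · rintro ⟨⟨k, v⟩, hkv, rfl⟩
    rw [List.mem_filter] at hkv
    obtain ⟨hmem, hv⟩ := hkv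
    rw [List.mem_map] at hmem
    obtain ⟨a, ha, heq⟩ := hmem
    obtain ⟨rfl, rfl⟩ := Prod.ext_iff.mp heq
    simp only [beq_iff_eq] at hv
    exact ⟨(PySem.Set.mem_ofList _ _).mp ha, hv⟩
  · rintro ⟨hm, hc⟩
    refine ⟨(x, (ranks.count x : Int)), ?_, rfl⟩
    rw [List.mem_filter]
    refine ⟨?_, by simpa using hc⟩
    rw [List.mem_map]
    exact ⟨x, (PySem.Set.mem_ofList _ _).mpr hm, rfl⟩

lemma mem_kind_alt_cands (n : Int) (ranks : List Int) (x : Int) :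
    x ∈ (((kindRuns (PySem.List.sorted ranks (fun x => x) false)).filter
          (fun p => p.2 == n)).map (fun p => p.1)) ↔
      x ∈ ranks ∧ (ranks.count x : Int) = n := by
  have hperm := PySem.List.sorted_perm (xs := ranks) (key := fun x => x) (rev := false)
  have hpair : (PySem.List.sorted ranks (fun x => x) false).Pairwise (· ≤ ·) :=
    PySem.List.sorted_pairwise (xs := ranks) (key := fun x => x)
  rw [List.mem_map]
  constructor
  · rintro ⟨⟨r, c⟩, hrc, rfl⟩
    rw [List.mem_filter] at hrc
    obtain ⟨hmem, hc⟩ := hrc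
    obtain ⟨hm, rfl⟩ := (mem_kindRuns _ hpair r c).mp hmem
    simp only [beq_iff_eq] at hc
    exact ⟨hperm.mem_iff.mp hm, by rw [hperm.count_eq] at hc; exact hc⟩
  · rintro ⟨hm, hc⟩
    refine ⟨(x, ((PySem.List.sorted ranks (fun x => x) false).count x : Int)), ?_, rfl⟩
    rw [List.mem_filter]
    constructor
    · exact (mem_kindRuns _ hpair x _).mpr ⟨hperm.mem_iff.mpr hm, rfl⟩
    · simp only [beq_iff_eq]
      rw [hperm.count_eq]; exact hc

-- ===== VERDICT (by name: the statement is the Claim_ definition above) =====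
theorem kind_spec : Claim_equal_kind := by
  intro n ranks _
  unfold Spec_kind kind kind_alt
  exact max?_id_congr _ _ (fun x =>
    (mem_kind_output n ranks x).trans (mem_kind_alt_cands n ranks x).symm)
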